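-- pv_equiv track=rewrite | github.com/Psyop/Cryptomatte | nuke/cryptomatte_utilities.py | _build_extraction_expression
-- ===== SOURCE A (Python) =====
-- def _build_condition(condition, IDs):
--     conditions = []
--     for ID in IDs:
--         conditions.append( condition.replace("ID", "{0:.12g}".format(ID)) )
--     return " || ".join(conditions)
--
-- def _build_extraction_expression(channel_list, IDs):
--     if not IDs:
--         return ""
--     sorted_ids = sorted(IDs)
--     iterated_expression = "({red_condition} ? sub_channel.green : 0.0) + ({blue_condition} ? sub_channel.alpha : 0.0) + more_work_needed"
--
--     subcondition_red =  "sub_channel.red == ID"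
--     subcondition_blue = "sub_channel.blue == ID"
--
--     expression = ""
--     for channel in channel_list:
--         condition_r = _build_condition(subcondition_red, sorted_ids)
--         condition_b = _build_condition(subcondition_blue, sorted_ids)
--
--         channel_expression = iterated_expression.replace("red_condition", condition_r).replace("blue_condition", condition_b)
--         channel_expression = channel_expression.replace("sub_channel", channel)
--
--         if not expression:
--             expression = channel_expression
--         else:
--             expression = expression.replace("more_work_needed", channel_expression)
--     expression = expression.replace("more_work_needed", "0")
--
--     expression = expression.replace("{", "(")
--     expression = expression.replace("}", ")")
--
--     return expression
-- ===== SOURCE B (Python) =====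
-- def _build_extraction_expression(channel_list, IDs):
--     if not IDs or not channel_list:
--         return ""
--     ids = ["{0:.12g}".format(ID) for ID in sorted(IDs)]
--     def condition(channel, component):
--         return " || ".join("{}.{} == {}".format(channel, component, i) for i in ids)
--     expression = "0"
--     for channel in reversed(channel_list):
--         expression = "(({}) ? {}.green : 0.0) + (({}) ? {}.alpha : 0.0) + {}".format(
--             condition(channel, "red"), channel, condition(channel, "blue"), channel, expression)
--     return expression.replace("{", "(").replace("}", ")")
-- ===== Notes on version B (the rewrite author's own statement) =====
-- stated objective: simpler
-- what changed: B drops A's sentinel-placeholder string-rewriting pipeline (build a template with red_condition/blue_condition/sub_channel/more_work_needed holes and repeatedly str.replace into a growing outer string) and instead formats each per-channel fragment directly with its channel name and precomputed sorted id strings, folding the nested expression inside-out from the accumulator "0" over reversed(channel_list).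
-- intended difference: On inputs with nonempty IDs and a channel name containing the sentinel "more_work_needed", A splices the next channel's expression (or "0") into the channel name itself (e.g. channel "more_work_needed" with IDs [1] yields "((0.red == 1) ? 0.green : 0.0) + ((0.blue == 1) ? 0.alpha : 0.0) + 0"), while B keeps the channel name intact, which is the intended output. — e.g. on _build_extraction_expression(["more_work_needed"], [1]): A returns "((0.red == 1) ? 0.green : 0.0) + ((0.blue == 1) ? 0.alpha : 0.0) + 0", B returns "((more_work_needed.red == 1) ? more_work_needed.green : 0.0) + ((more_work_needed.blue == 1) ? more_work_needed.alpha …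
import Mathlib
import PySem

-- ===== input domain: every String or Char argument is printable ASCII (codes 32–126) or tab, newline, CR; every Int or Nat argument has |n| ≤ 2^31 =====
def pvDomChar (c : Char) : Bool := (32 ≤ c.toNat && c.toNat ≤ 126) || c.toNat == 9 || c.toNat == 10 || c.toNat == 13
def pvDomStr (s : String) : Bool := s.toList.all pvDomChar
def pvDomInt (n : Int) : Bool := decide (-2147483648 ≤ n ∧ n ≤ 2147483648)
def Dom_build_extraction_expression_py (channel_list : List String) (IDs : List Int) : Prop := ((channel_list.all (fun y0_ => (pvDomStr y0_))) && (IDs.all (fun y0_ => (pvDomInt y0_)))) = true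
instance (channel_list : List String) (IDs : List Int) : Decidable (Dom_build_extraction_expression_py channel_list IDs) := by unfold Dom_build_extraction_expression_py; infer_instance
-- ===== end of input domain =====

-- B builds the nested expression directly by string concatenation (inside-out, no sentinel
-- placeholders); objective: simpler. On channels whose NAME contains the sentinel
-- "more_work_needed" A mangles the name (D_ below); B keeps the name intact.

-- ===== PORT A =====
-- "{0:.12g}".format(ID) is ported as str(ID): exact on the stated domain, where |ID| ≤ 2^31
-- has at most 10 significant digits, so the .12g format prints the integer exactly.
def build_condition_py (condition : String) (IDs : List Int) : String :=
  PySem.Str.join " || "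
    (IDs.foldl (fun conditions ID =>
      conditions ++ [PySem.Str.replace condition "ID" (PySem.Int.toStr ID)]) [])

def build_extraction_expression_py (channel_list : List String) (IDs : List Int) : String :=
  if IDs = [] then "" else
  let sorted_ids := PySem.List.sorted IDs (fun x => x) false
  let iterated_expression := "({red_condition} ? sub_channel.green : 0.0) + ({blue_condition} ? sub_channel.alpha : 0.0) + more_work_needed"
  let subcondition_red := "sub_channel.red == ID"
  let subcondition_blue := "sub_channel.blue == ID"
  let expression := channel_list.foldl (fun expression channel =>
    let condition_r := build_condition_py subcondition_red sorted_ids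
    let condition_b := build_condition_py subcondition_blue sorted_ids
    let channel_expression := PySem.Str.replace (PySem.Str.replace iterated_expression "red_condition" condition_r) "blue_condition" condition_b
    let channel_expression := PySem.Str.replace channel_expression "sub_channel" channel
    if expression = "" then channel_expression
    else PySem.Str.replace expression "more_work_needed" channel_expression) ""
  let expression := PySem.Str.replace expression "more_work_needed" "0"
  PySem.Str.replace (PySem.Str.replace expression "{" "(") "}" ")"

-- ===== PORT B =====
def alt_condition (channel : String) (component : String) (ids : List String) : String :=
  PySem.Str.join " || " (ids.map (fun i => channel ++ "." ++ component ++ " == " ++ i))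

def build_extraction_expression_py_alt (channel_list : List String) (IDs : List Int) : String :=
  if IDs = [] ∨ channel_list = [] then "" else
  let ids := (PySem.List.sorted IDs (fun x => x) false).map PySem.Int.toStr
  let expression := channel_list.reverse.foldl (fun expression channel =>
    "((" ++ alt_condition channel "red" ids ++ ") ? " ++ channel ++ ".green : 0.0) + ((" ++
    alt_condition channel "blue" ids ++ ") ? " ++ channel ++ ".alpha : 0.0) + " ++ expression) "0"
  PySem.Str.replace (PySem.Str.replace expression "{" "(") "}" ")"

-- ===== PRECONDITION & SPEC =====
-- On inputs with a nonempty ID list and a channel whose name contains the sentinel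
-- "more_work_needed", A splices later per-channel expressions (or "0") into the channel name
-- itself, while B keeps the channel name intact in the output, which is the intended value.
def D_build_extraction_expression_py (channel_list : List String) (IDs : List Int) : Prop :=
  IDs ≠ [] ∧ ∃ ch ∈ channel_list, PySem.Str.isIn "more_work_needed" ch = true
instance (channel_list : List String) (IDs : List Int) : Decidable (D_build_extraction_expression_py channel_list IDs) := by
  unfold D_build_extraction_expression_py; infer_instance

def Spec_build_extraction_expression_py (channel_list : List String) (IDs : List Int) (out : String) : Prop :=
  ¬ D_build_extraction_expression_py channel_list IDs → out = build_extraction_expression_py_alt channel_list IDs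
instance (channel_list : List String) (IDs : List Int) (out : String) : Decidable (Spec_build_extraction_expression_py channel_list IDs out) := by
  unfold Spec_build_extraction_expression_py; infer_instance

def pvDiffWitness_build_extraction_expression_py : List String × List Int := (["more_work_needed"], [1])
def pvDiffWitnessOut_build_extraction_expression_py : String × String :=
  ("((0.red == 1) ? 0.green : 0.0) + ((0.blue == 1) ? 0.alpha : 0.0) + 0",
   "((more_work_needed.red == 1) ? more_work_needed.green : 0.0) + ((more_work_needed.blue == 1) ? more_work_needed.alpha : 0.0) + 0")

-- ===== CLAIM (what is proved, stated in full; the proofs are below) =====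
def Claim_unchanged_build_extraction_expression_py : Prop := ∀ (channel_list : List String) (IDs : List Int), Dom_build_extraction_expression_py channel_list IDs → Spec_build_extraction_expression_py channel_list IDs (build_extraction_expression_py channel_list IDs)
def Claim_changed_build_extraction_expression_py : Prop := Dom_build_extraction_expression_py (pvDiffWitness_build_extraction_expression_py.1) (pvDiffWitness_build_extraction_expression_py.2) ∧ D_build_extraction_expression_py (pvDiffWitness_build_extraction_expression_py.1) (pvDiffWitness_build_extraction_expression_py.2) ∧ build_extraction_expression_py (pvDiffWitness_build_extraction_expression_py.1) (pvDiffWitness_build_extraction_expression_py.2) = pvDiffWitnessOut_build_extraction_expression_py.1 ∧ build_extraction_expression_py_alt (pvDiffWitness_build_extraction_expression_py.1) (pvDiffWitness_build_extraction_expression_py.2) = pvDiffWitnessOut_build_extraction_expression_py.2 ∧ pvDiffWitnessOut_build_extraction_expression_py.1 ≠ pvDiffWitnessOut_build_extraction_expression_py.2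

-- ===== LEMMAS AND PROOFS =====

-- ---- generic machinery about PySem.Chars.replace ----

-- no nonempty proper prefix of `old` is also a suffix of `old`
def Borderless (old : List Char) : Bool :=
  (List.range old.length).all (fun k => k == 0 || decide (old.drop (old.length - k) ≠ old.take k))

lemma borderless_apply {old : List Char} (hb : Borderless old = true) :
    ∀ k, k < old.length → 0 < k → old.drop (old.length - k) ≠ old.take k := by
  intro k hk hpos
  have := List.all_eq_true.mp hb k (List.mem_range.mpr hk)
  simp only [Bool.or_eq_true, beq_iff_eq, decide_eq_true_eq] at this
  rcases this with h | h
  · omega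
  · exact h

lemma go_nil (old new : List Char) (fuel : Nat) (acc : List Char) :
    PySem.Chars.replace.go old new fuel [] acc = acc.reverse := by
  cases fuel <;> simp [PySem.Chars.replace.go]

lemma go_cons (old new : List Char) (f : Nat) (c : Char) (t acc : List Char)
    (h : ¬ old <+: (c :: t)) :
    PySem.Chars.replace.go old new (f+1) (c :: t) acc
      = PySem.Chars.replace.go old new f t (c :: acc) := by
  rw [PySem.Chars.replace.go.eq_def]
  simp [List.isPrefixOf_iff_prefix, h]

lemma go_match (old new : List Char) (f : Nat) (tail acc : List Char) (hne : old ≠ []) :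
    PySem.Chars.replace.go old new (f+1) (old ++ tail) acc
      = PySem.Chars.replace.go old new f (List.drop old.length (old ++ tail)) (new.reverse ++ acc) := by
  rw [PySem.Chars.replace.go.eq_def]
  cases old with
  | nil => simp at hne
  | cons a b => simp [List.isPrefixOf_iff_prefix]

lemma go_skip (old new : List Char) (_hne : old ≠ []) :
    ∀ (p : List Char) (rest : List Char) (fuel : Nat) (acc : List Char),
      (p ++ rest).length ≤ fuel →
      (∀ i, i < p.length → ¬ old <+: ((p ++ rest).drop i)) →
      PySem.Chars.replace.go old new fuel (p ++ rest) acc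
        = PySem.Chars.replace.go old new (fuel - p.length) rest (p.reverse ++ acc) := by
  intro p
  induction p with
  | nil => intro rest fuel acc _ _; simp
  | cons c p' ih =>
    intro rest fuel acc hl hh
    cases fuel with
    | zero => simp at hl
    | succ f =>
      have h0 : ¬ old <+: (c :: (p' ++ rest)) := by
        have := hh 0 (by simp)
        simpa using this
      have : ((c :: p') ++ rest) = c :: (p' ++ rest) := by simp
      rw [this, go_cons old new f c (p' ++ rest) acc h0]
      have hstep := ih rest f (c :: acc) (by simp only [List.length_cons, List.length_append] at hl ⊢; omega)
        (fun i hi => by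
          have := hh (i+1) (by simp only [List.length_cons]; omega)
          simpa using this)
      rw [hstep]
      have h2 : f - p'.length = (f + 1) - (c :: p').length := by simp
      rw [h2]
      simp [List.append_assoc]

lemma prefix_append_left {old A B : List Char} (h : old <+: A ++ B) (hlen : old.length ≤ A.length) :
    old <+: A := by
  have := List.prefix_iff_eq_take.mp h
  rw [List.take_append_of_le_length hlen] at this
  exact this ▸ List.take_prefix _ _

lemma no_hit_last (old p : List Char) (hfree : ¬ old <:+: p) :
    ∀ i, i < p.length → ¬ old <+: p.drop i := by
  intro i _ hpre
  exact hfree (hpre.isInfix.trans (p.drop_suffix i).isInfix)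

lemma no_hit_mid (old p tail : List Char) (_hne : old ≠ []) (hb : Borderless old = true)
    (hfree : ¬ old <:+: p) :
    ∀ i, i < p.length → ¬ old <+: ((p ++ (old ++ tail)).drop i) := by
  intro i hi hpre
  have hdrop : (p ++ (old ++ tail)).drop i = p.drop i ++ (old ++ tail) := by
    rw [List.drop_append]
    congr 1
    rw [show i - p.length = 0 by omega]
    simp
  rw [hdrop] at hpre
  set m := p.length - i with hm
  have hmpos : 0 < m := by omega
  have hlendrop : (p.drop i).length = m := by simp [hm]
  by_cases hc : old.length ≤ m
  · have h1 : old <+: p.drop i := prefix_append_left hpre (by omega)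
    exact hfree (h1.isInfix.trans (p.drop_suffix i).isInfix)
  · have heq : old = p.drop i ++ (old ++ tail).take (old.length - m) := by
      have h1 := List.prefix_iff_eq_take.mp hpre
      rw [List.take_append] at h1
      rw [List.take_of_length_le (by omega)] at h1
      rw [hlendrop] at h1
      exact h1
    have htake : (old ++ tail).take (old.length - m) = old.take (old.length - m) := by
      rw [List.take_append_of_le_length (by omega)]
    rw [htake] at heq
    have hborder : old.drop m = old.take (old.length - m) := by
      conv_lhs => rw [heq]
      rw [show m = (p.drop i).length by omega, List.drop_left]
    exact borderless_apply hb (old.length - m) (by omega) (by omega)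
      (by rw [show old.length - (old.length - m) = m by omega]; exact hborder)

lemma go_join (old new : List Char) (hne : old ≠ []) (hb : Borderless old = true) :
    ∀ (parts : List (List Char)), parts ≠ [] → (∀ p ∈ parts, ¬ old <:+: p) →
    ∀ (fuel : Nat) (acc : List Char), (PySem.Chars.join old parts).length ≤ fuel →
      PySem.Chars.replace.go old new fuel (PySem.Chars.join old parts) acc
        = acc.reverse ++ PySem.Chars.join new parts := by
  intro parts
  induction parts with
  | nil => intro h; exact absurd rfl h
  | cons p ps ih =>
    intro _ hfree fuel acc hfuel
    cases ps with
    | nil =>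
      have hj : PySem.Chars.join old [p] = p ++ [] := by simp [pysem]
      have hj2 : PySem.Chars.join new [p] = p := by simp [pysem]
      rw [hj] at hfuel ⊢
      rw [go_skip old new hne p [] fuel acc hfuel
        (by
          intro i hi
          have := no_hit_last old p (hfree p (by simp)) i hi
          simpa using this)]
      rw [go_nil]
      simp [hj2]
    | cons q qs =>
      have hj : PySem.Chars.join old (p :: q :: qs)
          = p ++ (old ++ PySem.Chars.join old (q :: qs)) := by
        rw [PySem.Chars.join_cons_cons]; simp [List.append_assoc]
      rw [hj] at hfuel ⊢
      rw [go_skip old new hne p (old ++ PySem.Chars.join old (q :: qs)) fuel acc hfuel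
        (no_hit_mid old p (PySem.Chars.join old (q :: qs)) hne hb (hfree p (by simp)))]
      have hfuel2 : old.length + (PySem.Chars.join old (q :: qs)).length ≤ fuel - p.length := by
        simp only [List.length_append] at hfuel; omega
      have holen : 0 < old.length := by
        cases old with | nil => exact absurd rfl hne | cons a b => simp
      cases hf : fuel - p.length with
      | zero => omega
      | succ f =>
        rw [go_match old new f _ _ hne, List.drop_left]
        rw [ih (by simp) (fun r hr => hfree r (by simp [hr])) f (new.reverse ++ (p.reverse ++ acc))
          (by omega)]
        rw [PySem.Chars.join_cons_cons]
        simp [List.append_assoc]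

lemma replace_join (old new : List Char) (hne : old ≠ []) (hb : Borderless old = true)
    (parts : List (List Char)) (hp : parts ≠ []) (hfree : ∀ p ∈ parts, ¬ old <:+: p) :
    PySem.Chars.replace (PySem.Chars.join old parts) old new = PySem.Chars.join new parts := by
  rw [PySem.Chars.replace]
  have : old.isEmpty = false := by cases old with | nil => simp at hne | cons a b => rfl
  rw [this]
  simp only [Bool.false_eq_true, if_false]
  exact go_join old new hne hb parts hp hfree _ [] le_rfl

lemma go_char (a b : Char) :
    ∀ (s : List Char) (fuel : Nat) (acc : List Char), s.length ≤ fuel →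
      PySem.Chars.replace.go [a] [b] fuel s acc
        = acc.reverse ++ s.map (fun c => if c = a then b else c) := by
  intro s
  induction s with
  | nil => intro fuel acc _; rw [go_nil]; simp
  | cons c t ih =>
    intro fuel acc hf
    cases fuel with
    | zero => simp at hf
    | succ f =>
      by_cases hc : c = a
      · subst hc
        have : (c :: t) = [c] ++ t := rfl
        rw [this, go_match [c] [b] f t acc (by simp)]
        rw [show List.drop ([c].length) ([c] ++ t) = t from List.drop_left]
        rw [ih f _ (by simp at hf; omega)]
        simp
      · rw [go_cons [a] [b] f c t acc (by
          intro hpre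
          rcases hpre with ⟨u, hu⟩
          have := List.cons.injEq .. ▸ hu
          simp at hu
          exact hc hu.1.symm)]
        rw [ih f _ (by simp at hf; omega)]
        simp [hc]

lemma replace_char (s : List Char) (a b : Char) :
    PySem.Chars.replace s [a] [b] = s.map (fun c => if c = a then b else c) := by
  rw [PySem.Chars.replace]
  simp only [List.isEmpty_cons, Bool.false_eq_true, if_false]
  exact go_char a b s s.length [] le_rfl

-- infix splitting at a junction character
lemma infix_drop_iff (sub s : List Char) : (sub <:+: s) ↔ ∃ j, sub <+: s.drop j := by
  rw [← PySem.Chars.isIn_iff_infix, ← PySem.Chars.exists_prefix_drop_iff_isIn]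

lemma glue_right {old : List Char} {c : Char} (hc : c ∉ old) (s t : List Char)
    (h1 : ¬ old <:+: s) (h2 : ¬ old <:+: (c :: t)) : ¬ old <:+: (s ++ c :: t) := by
  intro h
  obtain ⟨j, hpre⟩ := (infix_drop_iff _ _).mp h
  rw [List.drop_append] at hpre
  by_cases hj : s.length ≤ j
  · rw [List.drop_eq_nil_of_le hj, List.nil_append] at hpre
    exact h2 (hpre.isInfix.trans ((c :: t).drop_suffix _).isInfix)
  · set m := s.length - j with hm
    have hmpos : 0 < m := by omega
    have hlendrop : (s.drop j).length = m := by simp [hm]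
    rw [show j - s.length = 0 by omega, List.drop_zero] at hpre
    by_cases hlen : old.length ≤ m
    · exact h1 ((prefix_append_left hpre (by omega)).isInfix.trans (s.drop_suffix j).isInfix)
    · have heq : old = s.drop j ++ (c :: t).take (old.length - m) := by
        have h1' := List.prefix_iff_eq_take.mp hpre
        rw [List.take_append, List.take_of_length_le (by omega), hlendrop] at h1'
        exact h1'
      have : c ∈ old := by
        rw [heq, List.take_cons (by omega : 0 < old.length - m)]
        exact List.mem_append_right _ (by simp)
      exact hc this

lemma glue_left {old : List Char} {c : Char} (hc : c ∉ old) (s t : List Char)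
    (h1 : ¬ old <:+: (s ++ [c])) (h2 : ¬ old <:+: t) : ¬ old <:+: ((s ++ [c]) ++ t) := by
  intro h
  obtain ⟨j, hpre⟩ := (infix_drop_iff _ _).mp h
  rw [List.drop_append] at hpre
  by_cases hj : (s ++ [c]).length ≤ j
  · rw [List.drop_eq_nil_of_le hj, List.nil_append] at hpre
    exact h2 (hpre.isInfix.trans (t.drop_suffix _).isInfix)
  · set m := (s ++ [c]).length - j with hm
    have hmpos : 0 < m := by omega
    have hlendrop : ((s ++ [c]).drop j).length = m := by simp only [List.length_drop]; omega
    rw [show j - (s ++ [c]).length = 0 by omega, List.drop_zero] at hpre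
    by_cases hlen : old.length ≤ m
    · exact h1 ((prefix_append_left hpre (by omega)).isInfix.trans ((s ++ [c]).drop_suffix j).isInfix)
    · have heq : old = (s ++ [c]).drop j ++ t.take (old.length - m) := by
        have h1' := List.prefix_iff_eq_take.mp hpre
        rw [List.take_append, List.take_of_length_le (by omega), hlendrop] at h1'
        exact h1'
      have hcmem : c ∈ (s ++ [c]).drop j := by
        have hj2 : j ≤ s.length := by simp at hm; omega
        rw [List.drop_append_of_le_length hj2]
        exact List.mem_append_right _ (by simp)
      exact hc (heq ▸ List.mem_append_left _ hcmem)

lemma not_infix_forbidden {old s : List Char} (c0 : Char) (hc0 : c0 ∈ old)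
    (h : ∀ c ∈ s, c ≠ c0) : ¬ old <:+: s :=
  fun hinf => h c0 (hinf.subset hc0) rfl

lemma not_infix_short {old s : List Char} (h : s.length < old.length) : ¬ old <:+: s :=
  fun hinf => absurd hinf.length_le (by omega)

-- ---- digits of an integer ----
lemma digitChar_mem (m : Nat) (h : m < 10) : Nat.digitChar m ∈ "0123456789".toList := by
  interval_cases m <;> decide

lemma toDigitsCore_subset : ∀ (f n : Nat) (acc : List Char),
    (∀ c ∈ acc, c ∈ "0123456789".toList) →
    ∀ c ∈ Nat.toDigitsCore 10 f n acc, c ∈ "0123456789".toList := by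
  intro f
  induction f with
  | zero => intro n acc hacc; rw [Nat.toDigitsCore]; exact hacc
  | succ f ih =>
    intro n acc hacc
    rw [Nat.toDigitsCore]
    split
    · intro c hc
      rcases List.mem_cons.mp hc with h | h
      · exact h ▸ digitChar_mem _ (Nat.mod_lt _ (by norm_num))
      · exact hacc _ h
    · exact ih _ _ (by
        intro c hc
        rcases List.mem_cons.mp hc with h | h
        · exact h ▸ digitChar_mem _ (Nat.mod_lt _ (by norm_num))
        · exact hacc _ h)

lemma idChar_mem (n : Int) : ∀ c ∈ PySem.Int.toChars n, c ∈ ('-' :: "0123456789".toList) := by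
  intro c hc
  rw [PySem.Int.toChars] at hc
  split at hc
  · rcases List.mem_cons.mp hc with h | h
    · simp [h]
    · have h' : c ∈ Nat.toDigitsCore 10 (n.natAbs + 1) n.natAbs [] := by
        rw [Nat.toDigits] at h; exact h
      exact List.mem_cons_of_mem _ (toDigitsCore_subset _ _ [] (by simp) _ h')
  · have h' : c ∈ Nat.toDigitsCore 10 (n.toNat + 1) n.toNat [] := by
      rw [Nat.toDigits] at hc; exact hc
    exact List.mem_cons_of_mem _ (toDigitsCore_subset _ _ [] (by simp) _ h')

lemma id_ne (n : Int) (c0 : Char) (h : c0 ∉ ('-' :: "0123456789".toList)) :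
    ∀ c ∈ PySem.Int.toChars n, c ≠ c0 :=
  fun c hc he => h (he ▸ idChar_mem n c hc)

-- ---- join helpers ----
lemma mem_join (x : Char) (sep : List Char) :
    ∀ parts, x ∈ PySem.Chars.join sep parts → x ∈ sep ∨ ∃ p ∈ parts, x ∈ p := by
  intro parts
  induction parts with
  | nil => simp [pysem]
  | cons p ps ih =>
    cases ps with
    | nil => simp [pysem]; tauto
    | cons q qs =>
      rw [PySem.Chars.join_cons_cons]
      intro hm
      simp only [List.mem_append] at hm
      rcases hm with (h | h) | h
      · right; exact ⟨p, by simp, h⟩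
      · left; exact h
      · rcases ih h with h | ⟨r, hr, hx⟩
        · left; exact h
        · right; exact ⟨r, by simp [hr], hx⟩


lemma join_cons_ne (x p : List Char) (rest : List (List Char)) (h : rest ≠ []) :
    PySem.Chars.join x (p :: rest) = p ++ x ++ PySem.Chars.join x rest := by
  cases rest with
  | nil => exact absurd rfl h
  | cons q qs => exact PySem.Chars.join_cons_cons x p q qs

lemma isin_false {a b : List Char} (h : PySem.Chars.isIn a b = false) : ¬ a <:+: b :=
  (PySem.Chars.isIn_eq_false_iff a b).mp h

lemma ni_congr {old a b : List Char} (h : ¬ old <:+: a) (e : b = a) : ¬ old <:+: b :=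
  e ▸ h

lemma join_single (x p : List Char) : PySem.Chars.join x [p] = p := by
  simp [pysem]

lemma all_ne {s : List Char} {c0 : Char} (h : s.all (fun c => c != c0) = true) :
    ∀ c ∈ s, c ≠ c0 := by
  intro c hc
  have := List.all_eq_true.mp h c hc
  simpa using this

-- ---- the strings of this program ----
def holeL : List Char := "more_work_needed".toList
def scL : List Char := "sub_channel".toList
def sepL : List Char := " || ".toList

def jcond (ch comp : List Char) (ts : List (List Char)) : List Char :=
  PySem.Chars.join sepL (ts.map (fun t => ch ++ comp ++ t))

def bodyBrace (ch : List Char) (ts : List (List Char)) : List Char :=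
  "({".toList ++ jcond ch ".red == ".toList ts ++ "} ? ".toList ++ ch ++
  ".green : 0.0) + ({".toList ++ jcond ch ".blue == ".toList ts ++ "} ? ".toList ++ ch ++
  ".alpha : 0.0) + ".toList

def sideParts (comp : List Char) : List (List Char) → List (List Char)
  | [] => []
  | [t] => [comp ++ t ++ "} ? ".toList]
  | t :: r => (comp ++ t ++ " || ".toList) :: sideParts comp r

def chanParts (ts : List (List Char)) : List (List Char) :=
  "({".toList :: (sideParts ".red == ".toList ts ++
    [".green : 0.0) + ({".toList] ++ sideParts ".blue == ".toList ts ++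
    [".alpha : 0.0) + more_work_needed".toList])

lemma sideParts_ne (comp t : List Char) (r : List (List Char)) :
    sideParts comp (t :: r) ≠ [] := by
  cases r <;> simp [sideParts]

lemma sideParts_mem (comp : List Char) :
    ∀ (ts : List (List Char)) (p : List Char), p ∈ sideParts comp ts →
      ∃ t ∈ ts, p = comp ++ t ++ " || ".toList ∨ p = comp ++ t ++ "} ? ".toList := by
  intro ts
  induction ts with
  | nil => simp [sideParts]
  | cons t r ih =>
    intro p hp
    cases r with
    | nil =>
      simp [sideParts] at hp
      exact ⟨t, by simp, Or.inr (by simp [hp, List.append_assoc])⟩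
    | cons u us =>
      rw [show sideParts comp (t :: u :: us)
            = (comp ++ t ++ " || ".toList) :: sideParts comp (u :: us) from rfl] at hp
      rcases List.mem_cons.mp hp with h | h
      · exact ⟨t, by simp, Or.inl h⟩
      · obtain ⟨t', ht', hor⟩ := ih p h
        exact ⟨t', by simp [ht'], hor⟩

lemma side_join (comp ch : List Char) :
    ∀ (ts : List (List Char)), ts ≠ [] → ∀ (q : List Char) (qs : List (List Char)),
      ch ++ PySem.Chars.join ch (sideParts comp ts ++ q :: qs)
        = jcond ch comp ts ++ "} ? ".toList ++ ch ++ PySem.Chars.join ch (q :: qs) := by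
  intro ts
  induction ts with
  | nil => intro h; exact absurd rfl h
  | cons t r ih =>
    intro _ q qs
    cases r with
    | nil =>
      rw [show sideParts comp [t] = [comp ++ t ++ "} ? ".toList] from rfl]
      rw [List.singleton_append, join_cons_ne ch _ _ (by simp)]
      rw [show jcond ch comp [t] = PySem.Chars.join sepL [ch ++ comp ++ t] from rfl,
        join_single]
      simp [List.append_assoc]
    | cons u us =>
      rw [show sideParts comp (t :: u :: us)
            = (comp ++ t ++ " || ".toList) :: sideParts comp (u :: us) from rfl]
      rw [List.cons_append, join_cons_ne ch _ _ (by
        intro hx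
        exact sideParts_ne comp u us (List.append_eq_nil_iff.mp hx).1)]
      rw [show jcond ch comp (t :: u :: us)
            = (ch ++ comp ++ t) ++ sepL ++ jcond ch comp (u :: us) by
          rw [jcond, List.map_cons, join_cons_ne sepL _ _ (by simp)]; rfl]
      have hIH := ih (by simp) q qs
      simp only [List.append_assoc] at hIH ⊢
      rw [← hIH]
      simp [sepL]

lemma chan_join (ts : List (List Char)) (h : ts ≠ []) (ch : List Char) :
    PySem.Chars.join ch (chanParts ts) = bodyBrace ch ts ++ holeL := by
  obtain ⟨t, r, rfl⟩ : ∃ t r, ts = t :: r := by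
    cases ts with
    | nil => exact absurd rfl h
    | cons t r => exact ⟨t, r, rfl⟩
  rw [chanParts, join_cons_ne ch _ _ (by
    intro hx
    exact sideParts_ne _ t r (List.append_eq_nil_iff.mp ((List.append_eq_nil_iff.mp ((List.append_eq_nil_iff.mp hx).1)).1)).1)]
  rw [show sideParts ".red == ".toList (t :: r) ++ [".green : 0.0) + ({".toList]
        ++ sideParts ".blue == ".toList (t :: r) ++ [".alpha : 0.0) + more_work_needed".toList]
      = sideParts ".red == ".toList (t :: r) ++ (".green : 0.0) + ({".toList
        :: (sideParts ".blue == ".toList (t :: r) ++ [".alpha : 0.0) + more_work_needed".toList])) by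
    simp]
  have h1 := side_join ".red == ".toList ch (t :: r) (by simp) (".green : 0.0) + ({".toList)
      (sideParts ".blue == ".toList (t :: r) ++ [".alpha : 0.0) + more_work_needed".toList])
  have h2 := side_join ".blue == ".toList ch (t :: r) (by simp)
      (".alpha : 0.0) + more_work_needed".toList) []
  rw [join_cons_ne ch (".green : 0.0) + ({".toList) _ (by
    intro hx
    exact sideParts_ne _ t r (List.append_eq_nil_iff.mp hx).1)] at h1
  rw [join_single] at h2
  simp only [List.append_assoc] at h1 h2 ⊢
  rw [h1, h2]
  rw [show (".alpha : 0.0) + more_work_needed".toList : List Char)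
      = ".alpha : 0.0) + ".toList ++ holeL by decide]
  rw [bodyBrace]
  simp [List.append_assoc]

-- A's _build_condition
lemma cond_eq_red (ids : List Int) :
    (build_condition_py "sub_channel.red == ID" ids).toList
      = jcond scL ".red == ".toList (ids.map PySem.Int.toChars) := by
  rw [build_condition_py, PySem.List.foldl_append_singleton_eq_map, List.nil_append,
    PySem.Str.toList_join, jcond]
  congr 1
  simp only [List.map_map]
  apply List.map_congr_left
  intro ID _
  simp only [Function.comp_apply]
  rw [PySem.Str.toList_replace, PySem.Int.toList_toStr]
  rw [show ("sub_channel.red == ID".toList : List Char)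
      = PySem.Chars.join "ID".toList ["sub_channel.red == ".toList, []] by decide]
  rw [replace_join "ID".toList (PySem.Int.toChars ID) (by decide) (by decide) _ (by simp)
    (by
      intro p hp
      rcases List.mem_cons.mp hp with rfl | hp
      · exact isin_false (by decide)
      · rcases List.mem_cons.mp hp with rfl | hp
        · exact isin_false (by decide)
        · cases hp)]
  rw [PySem.Chars.join_cons_cons, join_single]
  rw [show ("sub_channel.red == ".toList : List Char) = scL ++ ".red == ".toList by decide]
  simp [List.append_assoc]

lemma cond_eq_blue (ids : List Int) :
    (build_condition_py "sub_channel.blue == ID" ids).toList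
      = jcond scL ".blue == ".toList (ids.map PySem.Int.toChars) := by
  rw [build_condition_py, PySem.List.foldl_append_singleton_eq_map, List.nil_append,
    PySem.Str.toList_join, jcond]
  congr 1
  simp only [List.map_map]
  apply List.map_congr_left
  intro ID _
  simp only [Function.comp_apply]
  rw [PySem.Str.toList_replace, PySem.Int.toList_toStr]
  rw [show ("sub_channel.blue == ID".toList : List Char)
      = PySem.Chars.join "ID".toList ["sub_channel.blue == ".toList, []] by decide]
  rw [replace_join "ID".toList (PySem.Int.toChars ID) (by decide) (by decide) _ (by simp)
    (by
      intro p hp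
      rcases List.mem_cons.mp hp with rfl | hp
      · exact isin_false (by decide)
      · rcases List.mem_cons.mp hp with rfl | hp
        · exact isin_false (by decide)
        · cases hp)]
  rw [PySem.Chars.join_cons_cons, join_single]
  rw [show ("sub_channel.blue == ".toList : List Char) = scL ++ ".blue == ".toList by decide]
  simp [List.append_assoc]

lemma jcond_chars (ids : List Int) (comp base : List Char) (c0 : Char)
    (hcomp : ∀ c ∈ comp, c ≠ c0) (hbase : ∀ c ∈ base, c ≠ c0)
    (hsep : ∀ c ∈ sepL, c ≠ c0) (hid : c0 ∉ ('-' :: "0123456789".toList)) :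
    ∀ c ∈ jcond base comp (ids.map PySem.Int.toChars), c ≠ c0 := by
  intro c hc
  rcases mem_join c sepL _ hc with h | ⟨p, hp, hcp⟩
  · exact hsep c h
  · obtain ⟨t, ht, rfl⟩ := List.mem_map.mp hp
    obtain ⟨n, _, rfl⟩ := List.mem_map.mp ht
    rcases List.mem_append.mp hcp with h | h
    · rcases List.mem_append.mp h with h | h
      · exact hbase c h
      · exact hcomp c h
    · exact id_ne n c0 hid c h

-- A's per-channel expression
lemma ce_eq (ids : List Int) (hids : ids ≠ []) (channel : String) :
    (PySem.Str.replace (PySem.Str.replace (PySem.Str.replace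
        "({red_condition} ? sub_channel.green : 0.0) + ({blue_condition} ? sub_channel.alpha : 0.0) + more_work_needed"
        "red_condition" (build_condition_py "sub_channel.red == ID" ids))
        "blue_condition" (build_condition_py "sub_channel.blue == ID" ids))
        "sub_channel" channel).toList
      = bodyBrace channel.toList (ids.map PySem.Int.toChars) ++ holeL := by
  set ts := ids.map PySem.Int.toChars with hts
  have htsne : ts ≠ [] := by simp [hts, hids]
  rw [PySem.Str.toList_replace, PySem.Str.toList_replace, PySem.Str.toList_replace]
  rw [cond_eq_red ids, cond_eq_blue ids, ← hts]
  -- step 1: insert the red condition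
  rw [show ("({red_condition} ? sub_channel.green : 0.0) + ({blue_condition} ? sub_channel.alpha : 0.0) + more_work_needed".toList : List Char)
      = PySem.Chars.join "red_condition".toList
          ["({".toList,
           "} ? sub_channel.green : 0.0) + ({blue_condition} ? sub_channel.alpha : 0.0) + more_work_needed".toList] by decide]
  rw [replace_join "red_condition".toList _ (by decide) (by decide) _ (by simp)
    (by
      intro p hp
      rcases List.mem_cons.mp hp with rfl | hp
      · exact isin_false (by decide)
      · rcases List.mem_cons.mp hp with rfl | hp
        · exact isin_false (by decide)
        · cases hp)]
  rw [PySem.Chars.join_cons_cons, join_single]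
  -- step 2: insert the blue condition
  rw [show ("} ? sub_channel.green : 0.0) + ({blue_condition} ? sub_channel.alpha : 0.0) + more_work_needed".toList : List Char)
      = "} ? sub_channel.green : 0.0) + ({".toList ++ "blue_condition".toList
        ++ "} ? sub_channel.alpha : 0.0) + more_work_needed".toList by decide]
  rw [show ("({".toList ++ jcond scL ".red == ".toList ts
        ++ ("} ? sub_channel.green : 0.0) + ({".toList ++ "blue_condition".toList
            ++ "} ? sub_channel.alpha : 0.0) + more_work_needed".toList) : List Char)
      = PySem.Chars.join "blue_condition".toList
          ["({".toList ++ jcond scL ".red == ".toList ts ++ "} ? sub_channel.green : 0.0) + ({".toList,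
           "} ? sub_channel.alpha : 0.0) + more_work_needed".toList] by
    rw [PySem.Chars.join_cons_cons, join_single]
    simp [List.append_assoc]]
  rw [replace_join "blue_condition".toList _ (by decide) (by decide) _ (by simp)
    (by
      intro p hp
      rcases List.mem_cons.mp hp with rfl | hp
      · refine not_infix_forbidden 'o' (by decide) ?_
        intro c hc
        rcases List.mem_append.mp hc with h | h
        · rcases List.mem_append.mp h with h | h
          · exact all_ne (by decide) c h
          · exact jcond_chars ids ".red == ".toList scL 'o' (all_ne (by decide)) (all_ne (by decide))
              (all_ne (by decide)) (by decide) c (hts ▸ h)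
        · exact all_ne (by decide) c h
      · rcases List.mem_cons.mp hp with rfl | hp
        · exact isin_false (by decide)
        · cases hp)]
  rw [PySem.Chars.join_cons_cons, join_single]
  -- step 3: the result is bodyBrace of "sub_channel", i.e. join over chanParts
  rw [show ("({".toList ++ jcond scL ".red == ".toList ts ++ "} ? sub_channel.green : 0.0) + ({".toList
        ++ jcond scL ".blue == ".toList ts ++ "} ? sub_channel.alpha : 0.0) + more_work_needed".toList : List Char)
      = bodyBrace scL ts ++ holeL by
    rw [bodyBrace]
    rw [show ("} ? sub_channel.green : 0.0) + ({".toList : List Char)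
        = "} ? ".toList ++ scL ++ ".green : 0.0) + ({".toList by decide]
    rw [show ("} ? sub_channel.alpha : 0.0) + more_work_needed".toList : List Char)
        = "} ? ".toList ++ scL ++ ".alpha : 0.0) + ".toList ++ holeL by decide]
    simp [List.append_assoc]]
  -- step 4: substitute the channel for sub_channel
  rw [show ("sub_channel".toList : List Char) = scL from rfl]
  rw [← chan_join ts htsne scL]
  rw [replace_join scL channel.toList (by decide) (by decide) _ (by simp [chanParts])
    (by
      intro p hp
      refine not_infix_forbidden 's' (by decide) ?_
      intro c hc
      rw [chanParts] at hp
      rcases List.mem_cons.mp hp with rfl | hp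
      · exact all_ne (by decide) c hc
      · rcases List.mem_append.mp hp with hp | hp
        · rcases List.mem_append.mp hp with hp | hp
          · rcases List.mem_append.mp hp with hp | hp
            · obtain ⟨t, ht, hor⟩ := sideParts_mem _ _ p hp
              obtain ⟨n, _, rfl⟩ := List.mem_map.mp (hts ▸ ht)
              rcases hor with rfl | rfl <;>
                (rcases List.mem_append.mp hc with h | h
                 · rcases List.mem_append.mp h with h | h
                   · exact all_ne (by decide) c h
                   · exact id_ne n 's' (by decide) c h
                 · exact all_ne (by decide) c h)
            · rcases List.mem_singleton.mp hp with rfl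
              exact all_ne (by decide) c hc
          · obtain ⟨t, ht, hor⟩ := sideParts_mem _ _ p hp
            obtain ⟨n, _, rfl⟩ := List.mem_map.mp (hts ▸ ht)
            rcases hor with rfl | rfl <;>
              (rcases List.mem_append.mp hc with h | h
               · rcases List.mem_append.mp h with h | h
                 · exact all_ne (by decide) c h
                 · exact id_ne n 's' (by decide) c h
               · exact all_ne (by decide) c h)
        · rcases List.mem_singleton.mp hp with rfl
          exact all_ne (by decide) c hc)]
  rw [chan_join ts htsne channel.toList]

-- hole-freeness
lemma cond_free (ch : List Char) (hch : ¬ holeL <:+: ch) (comp' : List Char)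
    (hcomp : ∀ c ∈ comp', c ≠ 'w') :
    ∀ (ts : List (List Char)), ts ≠ [] → (∀ t ∈ ts, ∀ c ∈ t, c ≠ 'w') →
      ¬ holeL <:+: jcond ch ('.' :: comp') ts := by
  intro ts
  induction ts with
  | nil => intro h; exact absurd rfl h
  | cons t r ih =>
    intro _ hw
    cases r with
    | nil =>
      have h2 : ¬ holeL <:+: ('.' :: (comp' ++ t)) := by
        refine not_infix_forbidden 'w' (by decide) ?_
        intro c hc
        rcases List.mem_cons.mp hc with rfl | hc
        · decide
        · rcases List.mem_append.mp hc with h | h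
          · exact hcomp c h
          · exact hw t (by simp) c h
      have h3 := glue_right (show '.' ∉ holeL by decide) ch (comp' ++ t) hch h2
      refine ni_congr h3 ?_
      rw [jcond, List.map_singleton, join_single]
      simp [List.append_assoc]
    | cons u us =>
      have hrest : ¬ holeL <:+: jcond ch ('.' :: comp') (u :: us) :=
        ih (by simp) (fun t' ht' => hw t' (by simp [ht']))
      have h1 : ¬ holeL <:+: (('.' :: (comp' ++ t ++ [' ', '|', '|'])) ++ [' ']) := by
        refine not_infix_forbidden 'w' (by decide) ?_
        intro c hc
        rcases List.mem_append.mp hc with h | h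
        · rcases List.mem_cons.mp h with rfl | h
          · decide
          · rcases List.mem_append.mp h with h | h
            · rcases List.mem_append.mp h with h | h
              · exact hcomp c h
              · exact hw t (by simp) c h
            · fin_cases h <;> decide
        · rcases List.mem_singleton.mp h with rfl; decide
      have h2 := glue_left (show ' ' ∉ holeL by decide) _ _ h1 hrest
      have h2' : ¬ holeL <:+: ('.' :: (comp' ++ t ++ [' ', '|', '|'] ++ ([' '] ++ jcond ch ('.' :: comp') (u :: us)))) := by
        refine ni_congr h2 ?_
        simp [List.append_assoc]
      have h3 := glue_right (show '.' ∉ holeL by decide) ch _ hch h2'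
      refine ni_congr h3 ?_
      rw [jcond, List.map_cons, join_cons_ne sepL _ _ (by simp), ← jcond]
      simp [sepL, List.append_assoc]

lemma body_free (ch : List Char) (hch : ¬ holeL <:+: ch) (ids : List Int) (hids : ids ≠ []) :
    ¬ holeL <:+: bodyBrace ch (ids.map PySem.Int.toChars) := by
  set ts := ids.map PySem.Int.toChars with hts
  have htsne : ts ≠ [] := by simp [hts, hids]
  have hw : ∀ t ∈ ts, ∀ c ∈ t, c ≠ 'w' := by
    intro t' ht'
    obtain ⟨n, _, rfl⟩ := List.mem_map.mp (hts ▸ ht')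
    exact id_ne n 'w' (by decide)
  have hjr : ¬ holeL <:+: jcond ch ".red == ".toList ts := by
    have := cond_free ch hch "red == ".toList (all_ne (by decide)) ts htsne hw
    exact ni_congr this (by rfl)
  have hjb : ¬ holeL <:+: jcond ch ".blue == ".toList ts := by
    have := cond_free ch hch "blue == ".toList (all_ne (by decide)) ts htsne hw
    exact ni_congr this (by rfl)
  -- build up from the right
  have c9 : ¬ holeL <:+: (ch ++ '.' :: "alpha : 0.0) + ".toList) :=
    glue_right (show '.' ∉ holeL by decide) ch ("alpha : 0.0) + ".toList) hch
      (not_infix_forbidden 'w' (by decide) (all_ne (by decide)))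
  have c8 : ¬ holeL <:+: ('}' :: (" ? ".toList ++ (ch ++ '.' :: "alpha : 0.0) + ".toList))) := by
    have h := glue_left (show ' ' ∉ holeL by decide) "} ?".toList
      (ch ++ '.' :: "alpha : 0.0) + ".toList)
      (not_infix_forbidden 'w' (by decide) (all_ne (by decide))) c9
    exact ni_congr h (by simp)
  have c7 : ¬ holeL <:+: (jcond ch ".blue == ".toList ts
      ++ '}' :: (" ? ".toList ++ (ch ++ '.' :: "alpha : 0.0) + ".toList))) :=
    glue_right (show '}' ∉ holeL by decide) (jcond ch ".blue == ".toList ts)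
      (" ? ".toList ++ (ch ++ '.' :: "alpha : 0.0) + ".toList)) hjb c8
  have c6 : ¬ holeL <:+: ('.' :: ("green : 0.0) + ({".toList
      ++ (jcond ch ".blue == ".toList ts
        ++ '}' :: (" ? ".toList ++ (ch ++ '.' :: "alpha : 0.0) + ".toList))))) := by
    have h := glue_left (show '{' ∉ holeL by decide) ".green : 0.0) + (".toList
      (jcond ch ".blue == ".toList ts
        ++ '}' :: (" ? ".toList ++ (ch ++ '.' :: "alpha : 0.0) + ".toList)))
      (not_infix_forbidden 'w' (by decide) (all_ne (by decide))) c7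
    exact ni_congr h (by simp)
  have c5 : ¬ holeL <:+: (ch ++ '.' :: ("green : 0.0) + ({".toList
      ++ (jcond ch ".blue == ".toList ts
        ++ '}' :: (" ? ".toList ++ (ch ++ '.' :: "alpha : 0.0) + ".toList))))) :=
    glue_right (show '.' ∉ holeL by decide) ch _ hch c6
  have c4 : ¬ holeL <:+: ('}' :: (" ? ".toList ++ (ch ++ '.' :: ("green : 0.0) + ({".toList
      ++ (jcond ch ".blue == ".toList ts
        ++ '}' :: (" ? ".toList ++ (ch ++ '.' :: "alpha : 0.0) + ".toList))))))) := by
    have h := glue_left (show ' ' ∉ holeL by decide) "} ?".toList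
      (ch ++ '.' :: ("green : 0.0) + ({".toList
        ++ (jcond ch ".blue == ".toList ts
          ++ '}' :: (" ? ".toList ++ (ch ++ '.' :: "alpha : 0.0) + ".toList)))))
      (not_infix_forbidden 'w' (by decide) (all_ne (by decide))) c5
    exact ni_congr h (by simp)
  have c3 : ¬ holeL <:+: (jcond ch ".red == ".toList ts
      ++ '}' :: (" ? ".toList ++ (ch ++ '.' :: ("green : 0.0) + ({".toList
      ++ (jcond ch ".blue == ".toList ts
        ++ '}' :: (" ? ".toList ++ (ch ++ '.' :: "alpha : 0.0) + ".toList))))))) :=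
    glue_right (show '}' ∉ holeL by decide) (jcond ch ".red == ".toList ts) _ hjr c4
  have c2 : ¬ holeL <:+: (("(".toList ++ ['{']) ++ (jcond ch ".red == ".toList ts
      ++ '}' :: (" ? ".toList ++ (ch ++ '.' :: ("green : 0.0) + ({".toList
      ++ (jcond ch ".blue == ".toList ts
        ++ '}' :: (" ? ".toList ++ (ch ++ '.' :: "alpha : 0.0) + ".toList)))))))) :=
    glue_left (show '{' ∉ holeL by decide) "(".toList _
      (not_infix_forbidden 'w' (by decide) (all_ne (by decide))) c3
  refine ni_congr c2 ?_
  rw [bodyBrace]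
  simp [List.append_assoc]


-- ---- concatenated bodies ----
def bodiesB (chs : List String) (ts : List (List Char)) : List Char :=
  chs.foldr (fun ch acc => bodyBrace ch.toList ts ++ acc) []

lemma body_cons (x : List Char) (ts : List (List Char)) (y : List Char) :
    bodyBrace x ts ++ y = '(' :: ('{' :: (jcond x ".red == ".toList ts ++ ("} ? ".toList ++ (x ++
      (".green : 0.0) + ({".toList ++ (jcond x ".blue == ".toList ts ++ ("} ? ".toList ++ (x ++
      (".alpha : 0.0) + ".toList ++ y))))))))) := by
  rw [bodyBrace]
  simp [List.append_assoc]

lemma bodiesB_cons (c : String) (rest : List String) (ts : List (List Char)) :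
    bodiesB (c :: rest) ts = bodyBrace c.toList ts ++ bodiesB rest ts := rfl

-- A's loop invariant
lemma foldA (ids : List Int) (hids : ids ≠ []) :
    ∀ (chs : List String), (∀ ch ∈ chs, ¬ holeL <:+: ch.toList) →
    ∀ (E : String) (pre : List Char), ¬ holeL <:+: pre → E.toList = pre ++ holeL →
      (chs.foldl (fun expression channel =>
          if expression = "" then
            PySem.Str.replace (PySem.Str.replace (PySem.Str.replace
              "({red_condition} ? sub_channel.green : 0.0) + ({blue_condition} ? sub_channel.alpha : 0.0) + more_work_needed"
              "red_condition" (build_condition_py "sub_channel.red == ID" ids))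
              "blue_condition" (build_condition_py "sub_channel.blue == ID" ids))
              "sub_channel" channel
          else PySem.Str.replace expression "more_work_needed"
            (PySem.Str.replace (PySem.Str.replace (PySem.Str.replace
              "({red_condition} ? sub_channel.green : 0.0) + ({blue_condition} ? sub_channel.alpha : 0.0) + more_work_needed"
              "red_condition" (build_condition_py "sub_channel.red == ID" ids))
              "blue_condition" (build_condition_py "sub_channel.blue == ID" ids))
              "sub_channel" channel)) E).toList
        = pre ++ bodiesB chs (ids.map PySem.Int.toChars) ++ holeL
      ∧ ¬ holeL <:+: (pre ++ bodiesB chs (ids.map PySem.Int.toChars)) := by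
  intro chs
  induction chs with
  | nil =>
    intro _ E pre hpre hE
    refine ⟨?_, ?_⟩ <;> simpa [bodiesB] using (by assumption)
  | cons ch rest ih =>
    intro hfree E pre hpre hE
    set ts := ids.map PySem.Int.toChars with hts
    rw [List.foldl_cons]
    have hEne : ¬ (E = "") := by
      intro h
      rw [h] at hE
      simp at hE
      have : holeL ≠ [] := by decide
      simp [this] at hE
    simp only [if_neg hEne]
    have hjoin : (pre ++ holeL : List Char) = PySem.Chars.join holeL [pre, []] := by
      rw [PySem.Chars.join_cons_cons, join_single]
      simp
    have hrepl : (PySem.Str.replace E "more_work_needed"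
        (PySem.Str.replace (PySem.Str.replace (PySem.Str.replace
          "({red_condition} ? sub_channel.green : 0.0) + ({blue_condition} ? sub_channel.alpha : 0.0) + more_work_needed"
          "red_condition" (build_condition_py "sub_channel.red == ID" ids))
          "blue_condition" (build_condition_py "sub_channel.blue == ID" ids))
          "sub_channel" ch)).toList
        = pre ++ (bodyBrace ch.toList ts ++ holeL) := by
      rw [PySem.Str.toList_replace]
      rw [show ("more_work_needed".toList : List Char) = holeL from rfl]
      rw [hE, hjoin]
      rw [replace_join holeL _ (by decide) (by decide) _ (by simp)
        (by
          intro p hp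
          rcases List.mem_cons.mp hp with rfl | hp
          · exact hpre
          · rcases List.mem_cons.mp hp with rfl | hp
            · exact not_infix_short (by decide)
            · cases hp)]
      rw [PySem.Chars.join_cons_cons, join_single]
      rw [ce_eq ids hids ch]
      simp [hts]
    have hpre' : ¬ holeL <:+: (pre ++ bodyBrace ch.toList ts) := by
      have hsh := body_cons ch.toList ts []
      rw [List.append_nil] at hsh
      have hbf := body_free ch.toList (hfree ch (by simp)) ids hids
      rw [hsh]
      exact glue_right (show '(' ∉ holeL by decide) _ _ hpre
        (ni_congr (hts ▸ hbf) hsh.symm)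
    have := ih (fun c hc => hfree c (by simp [hc])) _ (pre ++ bodyBrace ch.toList ts) hpre'
      (by rw [hrepl]; simp [List.append_assoc])
    refine ⟨?_, ?_⟩
    · rw [this.1, bodiesB_cons]
      simp [List.append_assoc]
    · have h2 := this.2
      rw [bodiesB_cons]
      simpa [List.append_assoc] using h2


-- A's whole computation, on toList level
def f1 : Char → Char := fun c => if c = '{' then '(' else c
def f2 : Char → Char := fun c => if c = '}' then ')' else c
def brMap (s : List Char) : List Char := (s.map f1).map f2

lemma A_toList (IDs : List Int) (hids : IDs ≠ []) (c : String) (rest : List String)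
    (hfree : ∀ ch ∈ (c :: rest), ¬ holeL <:+: ch.toList) :
    (build_extraction_expression_py (c :: rest) IDs).toList
      = brMap (bodiesB (c :: rest) ((PySem.List.sorted IDs (fun x => x) false).map PySem.Int.toChars)
          ++ "0".toList) := by
  set sids := PySem.List.sorted IDs (fun x => x) false with hsids
  have hsne : sids ≠ [] := by
    rw [hsids, Ne, PySem.List.sorted_eq_nil_iff]
    exact hids
  set ts := sids.map PySem.Int.toChars with hts
  dsimp only [build_extraction_expression_py]
  rw [if_neg hids, ← hsids]
  rw [List.foldl_cons, if_pos rfl]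
  have hstep := foldA sids hsne rest (fun ch hch => hfree ch (by simp [hch]))
    (PySem.Str.replace (PySem.Str.replace (PySem.Str.replace
      "({red_condition} ? sub_channel.green : 0.0) + ({blue_condition} ? sub_channel.alpha : 0.0) + more_work_needed"
      "red_condition" (build_condition_py "sub_channel.red == ID" sids))
      "blue_condition" (build_condition_py "sub_channel.blue == ID" sids))
      "sub_channel" c)
    (bodyBrace c.toList ts)
    (by exact hts ▸ body_free c.toList (hfree c (by simp)) sids hsne)
    (by rw [ce_eq sids hsne c, hts])
  rw [PySem.Str.toList_replace, PySem.Str.toList_replace, PySem.Str.toList_replace]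
  rw [show ("{".toList : List Char) = ['{'] from rfl, show ("(".toList : List Char) = ['('] from rfl,
    show ("}".toList : List Char) = ['}'] from rfl, show (")".toList : List Char) = [')'] from rfl]
  rw [hstep.1]
  have hfree2 := hstep.2
  have hjoin : (bodyBrace c.toList ts ++ bodiesB rest ts ++ holeL : List Char)
      = PySem.Chars.join holeL [bodyBrace c.toList ts ++ bodiesB rest ts, []] := by
    rw [PySem.Chars.join_cons_cons, join_single]
    simp
  rw [show ("more_work_needed".toList : List Char) = holeL from rfl]
  rw [hjoin]
  rw [replace_join holeL _ (by decide) (by decide) _ (by simp)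
    (by
      intro p hp
      rcases List.mem_cons.mp hp with rfl | hp
      · exact hfree2
      · rcases List.mem_cons.mp hp with rfl | hp
        · exact not_infix_short (show ([] : List Char).length < holeL.length by decide)
        · cases hp)]
  rw [PySem.Chars.join_cons_cons, join_single]
  rw [replace_char, replace_char, brMap, bodiesB_cons]
  simp only [List.map_map, List.map_append, List.append_assoc]
  rfl

-- B's condition strings
lemma alt_red (ch : String) (ids0 : List Int) :
    (alt_condition ch "red" (ids0.map PySem.Int.toStr)).toList
      = jcond ch.toList ".red == ".toList (ids0.map PySem.Int.toChars) := by
  rw [alt_condition, PySem.Str.toList_join, jcond]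
  congr 1
  simp only [List.map_map]
  apply List.map_congr_left
  intro n _
  simp [PySem.Int.toList_toStr, List.append_assoc]

lemma alt_blue (ch : String) (ids0 : List Int) :
    (alt_condition ch "blue" (ids0.map PySem.Int.toStr)).toList
      = jcond ch.toList ".blue == ".toList (ids0.map PySem.Int.toChars) := by
  rw [alt_condition, PySem.Str.toList_join, jcond]
  congr 1
  simp only [List.map_map]
  apply List.map_congr_left
  intro n _
  simp [PySem.Int.toList_toStr, List.append_assoc]

def bodyDir (x : List Char) (ts : List (List Char)) : List Char :=
  "((".toList ++ jcond x ".red == ".toList ts ++ ") ? ".toList ++ x ++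
  ".green : 0.0) + ((".toList ++ jcond x ".blue == ".toList ts ++ ") ? ".toList ++ x ++
  ".alpha : 0.0) + ".toList

def bodiesD (chs : List String) (ts : List (List Char)) : List Char :=
  chs.foldr (fun ch acc => bodyDir ch.toList ts ++ acc) []

lemma foldB (ids0 : List Int) :
    ∀ (chs : List String),
      (chs.foldr (fun channel expression =>
          "((" ++ alt_condition channel "red" (ids0.map PySem.Int.toStr) ++ ") ? " ++ channel
          ++ ".green : 0.0) + ((" ++ alt_condition channel "blue" (ids0.map PySem.Int.toStr)
          ++ ") ? " ++ channel ++ ".alpha : 0.0) + " ++ expression) "0").toList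
        = bodiesD chs (ids0.map PySem.Int.toChars) ++ "0".toList := by
  intro chs
  induction chs with
  | nil => simp [bodiesD]
  | cons c rest ih =>
    rw [List.foldr_cons, show bodiesD (c :: rest) (ids0.map PySem.Int.toChars)
        = bodyDir c.toList (ids0.map PySem.Int.toChars) ++ bodiesD rest (ids0.map PySem.Int.toChars) from rfl]
    simp only [String.toList_append, ih, alt_red, alt_blue]
    rw [bodyDir]
    simp [List.append_assoc]

lemma B_toList (cl : List String) (IDs : List Int) (hids : IDs ≠ []) (hcl : cl ≠ []) :
    (build_extraction_expression_py_alt cl IDs).toList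
      = brMap (bodiesD cl ((PySem.List.sorted IDs (fun x => x) false).map PySem.Int.toChars)
          ++ "0".toList) := by
  dsimp only [build_extraction_expression_py_alt]
  rw [if_neg (by simp [hids, hcl])]
  rw [List.foldl_reverse]
  rw [PySem.Str.toList_replace, PySem.Str.toList_replace]
  rw [show ("{".toList : List Char) = ['{'] from rfl, show ("(".toList : List Char) = ['('] from rfl,
    show ("}".toList : List Char) = ['}'] from rfl, show (")".toList : List Char) = [')'] from rfl]
  rw [replace_char, replace_char]
  rw [foldB]
  rfl

-- the brace substitution agrees on the two body shapes
lemma brMap_append (a b : List Char) : brMap (a ++ b) = brMap a ++ brMap b := by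
  simp [brMap]

lemma brMap_body (x : List Char) (ts : List (List Char)) :
    brMap (bodyBrace x ts) = brMap (bodyDir x ts) := by
  rw [bodyBrace, bodyDir]
  simp only [brMap_append]
  rw [show brMap "({".toList = "((".toList by decide,
    show brMap "} ? ".toList = ") ? ".toList by decide,
    show brMap ".green : 0.0) + ({".toList = ".green : 0.0) + ((".toList by decide,
    show brMap ".alpha : 0.0) + ".toList = ".alpha : 0.0) + ".toList by decide,
    show brMap "((".toList = "((".toList by decide,
    show brMap ") ? ".toList = ") ? ".toList by decide,
    show brMap ".green : 0.0) + ((".toList = ".green : 0.0) + ((".toList by decide]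

lemma brMap_bodies (ts : List (List Char)) :
    ∀ (chs : List String), brMap (bodiesB chs ts ++ "0".toList) = brMap (bodiesD chs ts ++ "0".toList) := by
  intro chs
  induction chs with
  | nil => rfl
  | cons c rest ih =>
    have ih' := ih
    simp only [brMap_append] at ih'
    rw [bodiesB_cons, show bodiesD (c :: rest) ts = bodyDir c.toList ts ++ bodiesD rest ts from rfl]
    simp only [List.append_assoc, brMap_append]
    rw [brMap_body, ih']

-- ===== VERDICT (by name: the statement is the Claim_ definition above) =====
theorem build_extraction_expression_py_spec : Claim_unchanged_build_extraction_expression_py := by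
  intro channel_list IDs _hdom hnd
  by_cases hids : IDs = []
  · subst hids
    simp [build_extraction_expression_py, build_extraction_expression_py_alt]
  · by_cases hcl : channel_list = []
    · subst hcl
      apply String.toList_inj.mp
      have hB : build_extraction_expression_py_alt [] IDs = "" := by
        rw [build_extraction_expression_py_alt, if_pos (Or.inr rfl)]
      rw [hB]
      dsimp only [build_extraction_expression_py]
      rw [if_neg hids]
      rw [List.foldl_nil]
      rw [PySem.Str.toList_replace, PySem.Str.toList_replace, PySem.Str.toList_replace]
      rw [show ("" : String).toList = [] from rfl]
      rw [show PySem.Chars.replace [] "more_work_needed".toList "0".toList = [] by decide]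
      rw [show PySem.Chars.replace [] "{".toList "(".toList = [] by decide]
      rw [show PySem.Chars.replace [] "}".toList ")".toList = [] by decide]
    · have hnd' : ∀ ch ∈ channel_list, PySem.Str.isIn "more_work_needed" ch ≠ true := by
        intro ch hch h
        rw [D_build_extraction_expression_py] at hnd
        exact hnd ⟨hids, ch, hch, h⟩
      have hfree : ∀ ch ∈ channel_list, ¬ holeL <:+: ch.toList := by
        intro ch hch
        have h1 := hnd' ch hch
        have h2 : PySem.Str.isIn "more_work_needed" ch = false := by
          cases h : PySem.Str.isIn "more_work_needed" ch
          · rfl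
          · exact absurd h h1
        have h3 : ¬ ("more_work_needed".toList <:+: ch.toList) := by
          intro hinf
          have := (PySem.Str.isIn_iff_infix "more_work_needed" ch).mpr hinf
          rw [h2] at this
          simp at this
        exact h3
      obtain ⟨c, rest, rfl⟩ := List.exists_cons_of_ne_nil hcl
      apply String.toList_inj.mp
      rw [A_toList IDs hids c rest hfree, B_toList (c :: rest) IDs hids (by simp)]
      exact brMap_bodies _ (c :: rest)

set_option maxRecDepth 100000 in
theorem build_extraction_expression_py_changed : Claim_changed_build_extraction_expression_py := by
  unfold Claim_changed_build_extraction_expression_py; decide
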